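-- pv_equiv track=rewrite | github.com/Sandmax-1/advent_of_code_2024 | day_2/python/solution.py | part_2
-- ===== SOURCE A (Python) =====
-- def is_safe(safe_range: range, level: list[int], can_remove: bool) -> bool:
--     out = True
--
--     for ind in range(len(level) - 1):
--         diff = level[ind + 1] - level[ind]
--
--         if diff not in safe_range:
--             if can_remove:
--                 if ind != 0:
--                     out = is_safe(
--                         safe_range, [level[ind - 1]] + level[ind + 1 :], False
--                     ) or is_safe(
--                         safe_range, level[ind - 1 : ind + 1] + level[ind + 2 :], False
--                     )
--                 else:
--                     out = is_safe(safe_range, level[1:], False) or is_safe(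
--                         safe_range, [level[0]] + level[2:], False
--                     )
--                 break
--             else:
--                 out = False
--                 break
--     return out
--
-- def part_2(levels: list[tuple[int, ...]]) -> int:
--     total_safe = 0
--
--     for level in levels:
--         if is_safe(range(1, 4), list(level), True) or is_safe(
--             range(-3, 0), list(level), True
--         ):
--             total_safe += 1
--     return total_safe
-- ===== SOURCE B (Python) =====
-- def strict_safe(safe_range, seq):
--     return all(seq[i + 1] - seq[i] in safe_range for i in range(len(seq) - 1))
--
--
-- def part_2(levels):
--     total_safe = 0
--     for level in levels:
--         lv = list(level)
--         if any(
--             strict_safe(r, lv)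
--             or any(strict_safe(r, lv[:j] + lv[j + 1:]) for j in range(len(lv)))
--             for r in (range(1, 4), range(-3, 0))
--         ):
--             total_safe += 1
--     return total_safe
-- ===== Notes on version B (the rewrite author's own statement) =====
-- stated objective: simpler
-- what changed: A tests safety by recursing on the first out-of-range difference and retrying two locally truncated lists with removal disabled; B just checks each level directly and, failing that, brute-forces every single-element removal lv[:j]+lv[j+1:] against a plain all-adjacent-differences-in-range helper.
import Mathlib
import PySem

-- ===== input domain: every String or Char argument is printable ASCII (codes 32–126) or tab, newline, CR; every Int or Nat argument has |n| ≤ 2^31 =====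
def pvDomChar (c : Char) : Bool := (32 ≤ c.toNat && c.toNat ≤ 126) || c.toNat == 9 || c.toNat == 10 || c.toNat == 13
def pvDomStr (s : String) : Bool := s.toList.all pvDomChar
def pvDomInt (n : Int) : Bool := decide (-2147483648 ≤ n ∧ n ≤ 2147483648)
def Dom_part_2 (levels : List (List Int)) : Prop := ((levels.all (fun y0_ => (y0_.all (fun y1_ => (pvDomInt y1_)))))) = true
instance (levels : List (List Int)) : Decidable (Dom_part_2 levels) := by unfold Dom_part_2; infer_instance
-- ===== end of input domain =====

-- B re-implements part_2 by brute force over all single-element removals instead of A's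
-- first-violation local recursion (objective: simpler); return values proved equal on Dom.

-- ===== PORT A =====
-- the for-loop of Python is_safe, index ind; all list indices used are provably in range,
-- so Python's level[i] is ported as (level[i]?).getD 0 (the default is never used);
-- slices level[a:] / level[a:b] with 0 ≤ a ≤ b are exactly drop / drop+take.
def isSafeLoop (safe_range : List Int) (level : List Int) (can_remove : Bool) (ind : Nat) : Bool :=
  if _h : ind + 1 < level.length then
    let diff := (level[ind+1]?).getD 0 - (level[ind]?).getD 0
    if diff ∉ safe_range then
      match can_remove with
      | true =>
        if ind ≠ 0 then
          isSafeLoop safe_range ([(level[ind-1]?).getD 0] ++ level.drop (ind+1)) false 0 ||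
          isSafeLoop safe_range ((level.drop (ind-1)).take 2 ++ level.drop (ind+2)) false 0
        else
          isSafeLoop safe_range (level.drop 1) false 0 ||
          isSafeLoop safe_range ([(level[0]?).getD 0] ++ level.drop 2) false 0
      | false => false
    else
      isSafeLoop safe_range level can_remove (ind+1)
  else
    true
termination_by ((if can_remove then 1 else 0 : Nat), level.length - ind)
decreasing_by
  · simp; omega
  · simp; omega
  · simp; omega
  · simp; omega
  · cases can_remove <;> simp <;> omega

def is_safe (safe_range : List Int) (level : List Int) (can_remove : Bool) : Bool :=
  isSafeLoop safe_range level can_remove 0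

def part_2 (levels : List (List Int)) : Int :=
  levels.foldl
    (fun total_safe level =>
      if is_safe (PySem.List.pyRange 1 4 1) level true ||
         is_safe (PySem.List.pyRange (-3) 0 1) level true
      then total_safe + 1 else total_safe)
    0

-- ===== PORT B =====
-- seq[i] with 0 ≤ i < len: ported as (seq[i]?).getD 0 (default never used)
def strict_safe (safe_range : List Int) (seq : List Int) : Bool :=
  (List.range (seq.length - 1)).all
    (fun i => decide ((seq[i+1]?).getD 0 - (seq[i]?).getD 0 ∈ safe_range))

def part_2_alt (levels : List (List Int)) : Int :=
  levels.foldl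
    (fun total_safe level =>
      if [PySem.List.pyRange 1 4 1, PySem.List.pyRange (-3) 0 1].any (fun r =>
           strict_safe r level ||
           (List.range level.length).any
             (fun j => strict_safe r (level.take j ++ level.drop (j+1))))
      then total_safe + 1 else total_safe)
    0

-- ===== PRECONDITION & SPEC =====
def Spec_part_2 (levels : List (List Int)) (out : Int) : Prop := out = part_2_alt levels
instance (levels : List (List Int)) (out : Int) : Decidable (Spec_part_2 levels out) := by unfold Spec_part_2; infer_instance

-- ===== CLAIM (what is proved, stated in full; the proofs are below) =====
def Claim_equal_part_2 : Prop := ∀ (levels : List (List Int)), Dom_part_2 levels → Spec_part_2 levels (part_2 levels)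

-- ===== LEMMAS AND PROOFS =====
-- diff at index i (0 when out of range; only ever used in range)
def pvDiff (xs : List Int) (i : Nat) : Int := (xs[i+1]?).getD 0 - (xs[i]?).getD 0

-- "all diffs from index k on are in sr"
def pvSF (sr xs : List Int) (k : Nat) : Prop := ∀ i, k ≤ i → i + 1 < xs.length → pvDiff xs i ∈ sr

-- A's repair choices at the first violating index v, as propositions about the truncated lists
def pvRepair (sr lv : List Int) (v : Nat) : Prop :=
  if v = 0 then
    pvSF sr (lv.drop 1) 0 ∨ pvSF sr ([(lv[0]?).getD 0] ++ lv.drop 2) 0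
  else
    pvSF sr ([(lv[v-1]?).getD 0] ++ lv.drop (v+1)) 0 ∨
    pvSF sr ((lv.drop (v-1)).take 2 ++ lv.drop (v+2)) 0

theorem pvSF_vac (sr lv : List Int) (k : Nat) (h : lv.length ≤ k + 1) : pvSF sr lv k := by
  intro i hk hi; omega

theorem pvSF_succ (sr lv : List Int) (k : Nat) (hd : k + 1 < lv.length → pvDiff lv k ∈ sr) :
    pvSF sr lv k ↔ pvSF sr lv (k + 1) := by
  constructor
  · intro h i hk hi; exact h i (by omega) hi
  · intro h i hk hi
    rcases Nat.eq_or_lt_of_le hk with rfl | hk'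
    · exact hd hi
    · exact h i hk' hi

theorem loopF_iff (sr lv : List Int) (k : Nat) :
    isSafeLoop sr lv false k = true ↔ pvSF sr lv k := by
  generalize hfuel : lv.length - k = fuel
  induction fuel generalizing k with
  | zero =>
    rw [isSafeLoop]
    simp only [show ¬ (k + 1 < lv.length) by omega, dite_false]
    simp [pvSF_vac sr lv k (by omega)]
  | succ m ih =>
    rw [isSafeLoop]
    by_cases hlen : k + 1 < lv.length
    · simp only [hlen, dite_true]
      by_cases hd : (lv[k+1]?).getD 0 - (lv[k]?).getD 0 ∈ sr
      · simp only [hd, not_true_eq_false, ite_false]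
        rw [ih (k+1) (by omega)]
        exact (pvSF_succ sr lv k (fun _ => hd)).symm
      · rw [if_pos (by simp [hd])]
        simp only [Bool.false_eq_true, false_iff]
        intro hsf
        exact hd (hsf k (le_refl k) hlen)
    · simp only [hlen, dite_false]
      simp [pvSF_vac sr lv k (by omega)]

theorem loopT_iff (sr lv : List Int) (k : Nat) :
    isSafeLoop sr lv true k = true ↔
      pvSF sr lv k ∨ ∃ v, k ≤ v ∧ v + 1 < lv.length ∧ pvDiff lv v ∉ sr ∧
        (∀ i, k ≤ i → i < v → pvDiff lv i ∈ sr) ∧ pvRepair sr lv v := by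
  generalize hfuel : lv.length - k = fuel
  induction fuel generalizing k with
  | zero =>
    rw [isSafeLoop]
    simp only [show ¬ (k + 1 < lv.length) by omega, dite_false]
    simp only [true_iff]
    exact Or.inl (pvSF_vac sr lv k (by omega))
  | succ m ih =>
    rw [isSafeLoop]
    by_cases hlen : k + 1 < lv.length
    · simp only [hlen, dite_true]
      by_cases hd : (lv[k+1]?).getD 0 - (lv[k]?).getD 0 ∈ sr
      · rw [if_neg (by simp [hd])]
        rw [ih (k+1) (by omega)]
        constructor
        · rintro (hsf | ⟨v, hv1, hv2, hv3, hv4, hv5⟩)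
          · exact Or.inl ((pvSF_succ sr lv k (fun _ => hd)).mpr hsf)
          · refine Or.inr ⟨v, by omega, hv2, hv3, ?_, hv5⟩
            intro i h1 h2
            rcases Nat.eq_or_lt_of_le h1 with rfl | h'
            · exact hd
            · exact hv4 i h' h2
        · rintro (hsf | ⟨v, hv1, hv2, hv3, hv4, hv5⟩)
          · exact Or.inl ((pvSF_succ sr lv k (fun _ => hd)).mp hsf)
          · refine Or.inr ⟨v, ?_, hv2, hv3, fun i h1 h2 => hv4 i (by omega) h2, hv5⟩
            rcases Nat.eq_or_lt_of_le hv1 with rfl | _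
            · exact absurd hd hv3
            · omega
      · rw [if_pos (by simp [hd])]
        have hrep : ∀ b1 b2 p1 p2, (b1 = true ↔ p1) → (b2 = true ↔ p2) →
            ((b1 || b2) = true ↔ (p1 ∨ p2)) := by
          intro b1 b2 p1 p2 h1 h2; simp [h1, h2]
        by_cases hk0 : k ≠ 0
        · rw [if_pos hk0]
          rw [hrep _ _ _ _ (loopF_iff sr _ 0) (loopF_iff sr _ 0)]
          constructor
          · intro hh
            refine Or.inr ⟨k, le_refl k, hlen, hd, fun i h1 h2 => absurd h1 (by omega), ?_⟩
            simpa [pvRepair, hk0] using hh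
          · rintro (hsf | ⟨v, hv1, hv2, hv3, hv4, hv5⟩)
            · exact absurd (hsf k (le_refl k) hlen) hd
            · have hvk : v = k := by
                rcases Nat.eq_or_lt_of_le hv1 with rfl | h'
                · rfl
                · exact absurd (hv4 k (le_refl k) h') hd
              subst hvk
              simpa [pvRepair, hk0] using hv5
        · rw [if_neg hk0]
          have hk0' : k = 0 := by omega
          subst hk0'
          rw [hrep _ _ _ _ (loopF_iff sr _ 0) (loopF_iff sr _ 0)]
          constructor
          · intro hh
            exact Or.inr ⟨0, le_refl 0, hlen, hd, fun i h1 h2 => absurd h2 (by omega),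
              by simpa [pvRepair] using hh⟩
          · rintro (hsf | ⟨v, hv1, hv2, hv3, hv4, hv5⟩)
            · exact absurd (hsf 0 (le_refl 0) hlen) hd
            · have hvk : v = 0 := by
                by_contra hne
                exact hd (hv4 0 (by omega) (by omega))
              subst hvk
              simpa [pvRepair] using hv5
    · simp only [hlen, dite_false]
      simp only [true_iff]
      exact Or.inl (pvSF_vac sr lv k (by omega))

theorem strict_iff (sr lv : List Int) : strict_safe sr lv = true ↔ pvSF sr lv 0 := by
  simp only [strict_safe, List.all_eq_true, List.mem_range, decide_eq_true_eq]
  constructor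
  · intro h i _ hi; exact h i (by omega)
  · intro h i hi; exact h i (by omega) (by omega)

-- element i of lv with index j removed
-- element lookup in lv with index v removed
theorem getE (lv : List Int) (v i : Nat) :
    (lv.take v ++ lv.drop (v+1))[i]? = if i < v then lv[i]? else lv[i+1]? := by
  by_cases h : i < v
  · rw [if_pos h]
    by_cases h2 : i < lv.length
    · rw [List.getElem?_append_left (by simp only [List.length_take]; omega)]
      exact List.getElem?_take_of_lt h
    · rw [List.getElem?_append_right (by simp only [List.length_take]; omega)]
      rw [List.getElem?_drop]
      rw [List.getElem?_eq_none_iff.mpr (by simp only [List.length_take]; omega)]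
      exact (List.getElem?_eq_none_iff.mpr (by omega)).symm
  · rw [if_neg h]
    rw [List.getElem?_append_right (by simp only [List.length_take]; omega)]
    rw [List.getElem?_drop]
    by_cases h2 : v ≤ lv.length
    · congr 1
      simp only [List.length_take]; omega
    · rw [List.getElem?_eq_none_iff.mpr (by simp only [List.length_take]; omega)]
      exact (List.getElem?_eq_none_iff.mpr (by omega)).symm

theorem lenE (lv : List Int) (v : Nat) (h : v < lv.length) :
    (lv.take v ++ lv.drop (v+1)).length = lv.length - 1 := by
  simp [List.length_take, List.length_drop]; omega

-- characterization of "all diffs safe" for lv with index v removed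
theorem SF_E (sr lv : List Int) (v : Nat) (hv : v < lv.length) :
    pvSF sr (lv.take v ++ lv.drop (v+1)) 0 ↔
      (∀ i, i + 1 < v → pvDiff lv i ∈ sr) ∧
      (1 ≤ v → v + 1 < lv.length → (lv[v+1]?).getD 0 - (lv[v-1]?).getD 0 ∈ sr) ∧
      pvSF sr lv (v + 1) := by
  constructor
  · intro h
    refine ⟨?_, ?_, ?_⟩
    · intro i hi
      have := h i (by omega) (by rw [lenE lv v hv]; omega)
      rwa [pvDiff, getE, getE, if_pos (by omega), if_pos (by omega)] at this
    · intro h1 h2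
      have := h (v-1) (by omega) (by rw [lenE lv v hv]; omega)
      rwa [pvDiff, getE, getE, if_neg (by omega), if_pos (by omega),
        show v - 1 + 1 = v by omega] at this
    · intro i hi hlen
      have := h (i-1) (by omega) (by rw [lenE lv v hv]; omega)
      rwa [pvDiff, getE, getE, if_neg (by omega), if_neg (by omega),
        show i - 1 + 1 = i by omega] at this
  · rintro ⟨h1, h2, h3⟩ i _ hlen
    rw [lenE lv v hv] at hlen
    rw [pvDiff, getE, getE]
    by_cases hc1 : i + 1 < v
    · rw [if_pos (by omega), if_pos (by omega)]
      exact h1 i hc1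
    · by_cases hc2 : i < v
      · -- i = v - 1, 1 ≤ v
        rw [if_neg (by omega), if_pos (by omega),
          show i + 1 + 1 = v + 1 by omega, show i = v - 1 by omega]
        exact h2 (by omega) (by omega)
      · rw [if_neg (by omega), if_neg (by omega)]
        exact h3 (i+1) (by omega) (by omega)

-- removing any index other than v or v+1 keeps the violating pair adjacent
theorem notSF_E_far (sr lv : List Int) (v j : Nat) (hv : v + 1 < lv.length)
    (hd : pvDiff lv v ∉ sr) (hj : j < lv.length) (h1 : j ≠ v) (h2 : j ≠ v + 1) :
    ¬ pvSF sr (lv.take j ++ lv.drop (j+1)) 0 := by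
  intro h
  by_cases hlt : j < v
  · have := h (v-1) (by omega) (by rw [lenE lv j hj]; omega)
    rw [pvDiff, getE, getE, if_neg (by omega), if_neg (by omega),
      show v - 1 + 1 = v by omega] at this
    exact hd this
  · have hgt : v + 1 < j := by omega
    have := h v (by omega) (by rw [lenE lv j hj]; omega)
    rw [pvDiff, getE, getE, if_pos (by omega), if_pos (by omega)] at this
    exact hd this

-- drop m of lv: its diffs are lv's diffs from m on
theorem SF_drop (sr lv : List Int) (m : Nat) : pvSF sr (lv.drop m) 0 ↔ pvSF sr lv m := by
  constructor
  · intro h i hm hlen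
    have := h (i - m) (by omega) (by simp [List.length_drop]; omega)
    rwa [pvDiff, List.getElem?_drop, List.getElem?_drop,
      show m + (i - m + 1) = i + 1 by omega, show m + (i - m) = i by omega] at this
  · intro h i _ hlen
    simp only [List.length_drop] at hlen
    rw [pvDiff, List.getElem?_drop, List.getElem?_drop, show m + (i + 1) = (m + i) + 1 by omega]
    exact h (m + i) (by omega) (by omega)

-- prepending one element
theorem SF_cons (sr : List Int) (a : Int) (xs : List Int) :
    pvSF sr (a :: xs) 0 ↔ ((1 ≤ xs.length → (xs[0]?).getD 0 - a ∈ sr) ∧ pvSF sr xs 0) := by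
  constructor
  · intro h
    constructor
    · intro hx
      have := h 0 (by omega) (by simp; omega)
      rwa [pvDiff, show (a :: xs)[0+1]? = xs[0]? from rfl, show (a :: xs)[0]? = some a from rfl] at this
    · intro i _ hlen
      have := h (i+1) (by omega) (by simp; omega)
      rwa [pvDiff, show (a :: xs)[i+1+1]? = xs[i+1]? from rfl,
        show (a :: xs)[i+1]? = xs[i]? from rfl] at this
  · rintro ⟨h1, h2⟩ i _ hlen
    simp only [List.length_cons] at hlen
    match i with
    | 0 =>
      rw [pvDiff, show (a :: xs)[0+1]? = xs[0]? from rfl, show (a :: xs)[0]? = some a from rfl]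
      exact h1 (by omega)
    | Nat.succ i =>
      rw [pvDiff, show (a :: xs)[i+1+1]? = xs[i+1]? from rfl,
        show (a :: xs)[i+1]? = xs[i]? from rfl]
      exact h2 i (by omega) (by omega)

-- the two-element slice level[v-1 : v+1] as explicit elements
theorem t2_eq (lv : List Int) (v : Nat) (hv1 : 1 ≤ v) (hv : v < lv.length) :
    (lv.drop (v-1)).take 2 = [(lv[v-1]?).getD 0, (lv[v]?).getD 0] := by
  rw [List.drop_eq_getElem_cons (by omega : v - 1 < lv.length),
    show v - 1 + 1 = v by omega,
    List.drop_eq_getElem_cons (by omega : v < lv.length)]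
  rw [List.getElem?_eq_getElem (by omega : v - 1 < lv.length),
    List.getElem?_eq_getElem (by omega : v < lv.length)]
  rfl

-- existence of a first violating index
theorem firstViol (sr lv : List Int) (h : ¬ pvSF sr lv 0) :
    ∃ v, v + 1 < lv.length ∧ pvDiff lv v ∉ sr ∧ ∀ i, i < v → pvDiff lv i ∈ sr := by
  have hex : ∃ v, v + 1 < lv.length ∧ pvDiff lv v ∉ sr := by
    by_contra hc
    push Not at hc
    exact h (fun i _ hi => hc i hi)
  refine ⟨Nat.find hex, (Nat.find_spec hex).1, (Nat.find_spec hex).2, ?_⟩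
  intro i hi
  have := Nat.find_min hex hi
  push Not at this
  exact this (by have := (Nat.find_spec hex).1; omega)

-- A's repair at the first violation succeeds iff removing index v or v+1 makes the list safe
theorem repair_iff (sr lv : List Int) (v : Nat) (hv : v + 1 < lv.length)
    (hd : pvDiff lv v ∉ sr) (hpre : ∀ i, i < v → pvDiff lv i ∈ sr) :
    pvRepair sr lv v ↔
      (pvSF sr (lv.take v ++ lv.drop (v+1)) 0 ∨
       pvSF sr (lv.take (v+1) ++ lv.drop (v+1+1)) 0) := by
  rw [SF_E sr lv v (by omega), SF_E sr lv (v+1) (by omega)]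
  by_cases h0 : v = 0
  · subst h0
    rw [pvRepair, if_pos rfl]
    constructor
    · rintro (h | h)
      · left
        refine ⟨fun i hi => by omega, fun h1 _ => by omega, ?_⟩
        rw [← SF_drop sr lv 1]
        exact h
      · right
        rw [List.singleton_append, SF_cons, SF_drop] at h
        refine ⟨fun i hi => by omega, fun _ h2 => ?_, h.2⟩
        have := h.1 (by simp; omega)
        rwa [List.getElem?_drop] at this
    · rintro (⟨_, _, h3⟩ | ⟨_, h2, h3⟩)
      · left
        rw [SF_drop]
        exact h3
      · right
        rw [List.singleton_append, SF_cons, SF_drop]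
        refine ⟨fun hlen => ?_, h3⟩
        simp only [List.length_drop] at hlen
        rw [List.getElem?_drop]
        exact h2 (by omega) (by omega)
  · rw [pvRepair, if_neg h0]
    have hv1 : 1 ≤ v := by omega
    constructor
    · rintro (h | h)
      · left
        rw [List.singleton_append, SF_cons, SF_drop] at h
        refine ⟨fun i hi => hpre i (by omega), fun _ _ => ?_, h.2⟩
        have := h.1 (by simp; omega)
        rwa [List.getElem?_drop] at this
      · right
        rw [t2_eq lv v hv1 (by omega)] at h
        rw [show ([(lv[v-1]?).getD 0, (lv[v]?).getD 0] : List Int) ++ lv.drop (v+2) =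
            (lv[v-1]?).getD 0 :: ((lv[v]?).getD 0 :: lv.drop (v+2)) from rfl,
          SF_cons, SF_cons, SF_drop] at h
        refine ⟨fun i hi => hpre i (by omega), fun _ h2 => ?_, h.2.2⟩
        have := h.2.1 (by simp only [List.length_drop]; omega)
        rw [List.getElem?_drop] at this
        rwa [show v + 2 + 0 = v + 1 + 1 by omega] at this
    · rintro (⟨_, h2, h3⟩ | ⟨_, h2, h3⟩)
      · left
        rw [List.singleton_append, SF_cons, SF_drop]
        refine ⟨fun hlen => ?_, h3⟩
        rw [List.getElem?_drop]
        exact h2 hv1 (by omega)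
      · right
        rw [t2_eq lv v hv1 (by omega),
          show ([(lv[v-1]?).getD 0, (lv[v]?).getD 0] : List Int) ++ lv.drop (v+2) =
            (lv[v-1]?).getD 0 :: ((lv[v]?).getD 0 :: lv.drop (v+2)) from rfl,
          SF_cons, SF_cons, SF_drop]
        refine ⟨fun _ => ?_, fun hlen => ?_, h3⟩
        · have := hpre (v-1) (by omega)
          rwa [pvDiff, show v - 1 + 1 = v by omega] at this
        · simp only [List.length_drop] at hlen
          rw [List.getElem?_drop, show v + 2 + 0 = v + 1 + 1 by omega]
          exact h2 (by omega) (by omega)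

-- per-level: A's is_safe equals B's already-safe-or-some-removal check
theorem key (sr lv : List Int) :
    is_safe sr lv true =
      (strict_safe sr lv ||
       (List.range lv.length).any (fun j => strict_safe sr (lv.take j ++ lv.drop (j+1)))) := by
  rw [Bool.eq_iff_iff]
  rw [show is_safe sr lv true = isSafeLoop sr lv true 0 from rfl, loopT_iff]
  simp only [Bool.or_eq_true, List.any_eq_true, List.mem_range, strict_iff]
  constructor
  · rintro (hsf | ⟨v, _, hv2, hv3, hv4, hv5⟩)
    · exact Or.inl hsf
    · right
      have hpre : ∀ i, i < v → pvDiff lv i ∈ sr := fun i hi => hv4 i (by omega) hi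
      rcases (repair_iff sr lv v hv2 hv3 hpre).mp hv5 with h | h
      · exact ⟨v, by omega, h⟩
      · exact ⟨v+1, by omega, h⟩
  · rintro (hsf | ⟨j, hj, hsfe⟩)
    · exact Or.inl hsf
    · by_cases hall : pvSF sr lv 0
      · exact Or.inl hall
      · obtain ⟨v, hv1, hv2, hv3⟩ := firstViol sr lv hall
        right
        refine ⟨v, by omega, hv1, hv2, fun i _ hi => hv3 i hi, ?_⟩
        rw [repair_iff sr lv v hv1 hv2 hv3]
        by_cases hjv : j = v
        · subst hjv; exact Or.inl hsfe
        · by_cases hjv1 : j = v + 1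
          · subst hjv1; exact Or.inr hsfe
          · exact absurd hsfe (notSF_E_far sr lv v j hv1 hv2 hj hjv hjv1)

-- ===== VERDICT (by name: the statement is the Claim_ definition above) =====
theorem part_2_spec : Claim_equal_part_2 := by
  intro levels _
  unfold Spec_part_2 part_2 part_2_alt
  congr 1
  funext total_safe lv
  rw [key, key]
  simp [Bool.or_assoc]
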